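-- pv_equiv track=rewrite | github.com/brammittendorff/whois-list | scan_domains.py | generate_domains
-- ===== SOURCE A (Python) =====
-- import itertools
-- import string
--
-- def generate_domains(tld, min_length=3, max_length=16):
--     chars = string.ascii_lowercase + string.digits + "-"
--     tld = tld.lstrip('.')
--
--     for length in range(min_length, max_length + 1):
--         for combo in itertools.product(chars, repeat=length):
--             domain = ''.join(combo)
--             if is_valid_domain(domain):
--                 yield domain + '.' + tld
--
-- def is_valid_domain(domain):
--     # Check if the domain is valid
--     if domain[0] == '-' or domain[-1] == '-':
--         return False
--     if not any(c.isalnum() for c in domain):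
--         return False
--     # Allow consecutive dashes, but not at the start or end
--     if domain.startswith('--') or domain.endswith('--'):
--         return False
--     return True
-- ===== SOURCE B (Python) =====
-- import itertools
-- import string
--
--
-- def generate_domains(tld, min_length=3, max_length=16):
--     # Generate only valid domains directly: first/last char restricted to
--     # alphanumerics, interior chars may also be '-'.  Same output order as
--     # filtering the full product, because the restricted alphabets keep the
--     # relative character order and product is lexicographic.
--     alnum = string.ascii_lowercase + string.digits
--     chars = alnum + "-"
--     suffix = '.' + tld.lstrip('.')
--     for length in range(max(min_length, 1), max_length + 1):
--         if length == 1: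
--             pools = [alnum]
--         else:
--             pools = [alnum] + [chars] * (length - 2) + [alnum]
--         for combo in itertools.product(*pools):
--             yield ''.join(combo) + suffix
-- ===== Notes on version B (the rewrite author's own statement) =====
-- stated objective: alternative
-- what changed: B drops the is_valid_domain filter and generates only valid domains directly by taking the cartesian product over restricted alphabets (alphanumerics at the first and last position, full charset inside), which reproduces A's exact lexicographic output order.
import Mathlib
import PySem

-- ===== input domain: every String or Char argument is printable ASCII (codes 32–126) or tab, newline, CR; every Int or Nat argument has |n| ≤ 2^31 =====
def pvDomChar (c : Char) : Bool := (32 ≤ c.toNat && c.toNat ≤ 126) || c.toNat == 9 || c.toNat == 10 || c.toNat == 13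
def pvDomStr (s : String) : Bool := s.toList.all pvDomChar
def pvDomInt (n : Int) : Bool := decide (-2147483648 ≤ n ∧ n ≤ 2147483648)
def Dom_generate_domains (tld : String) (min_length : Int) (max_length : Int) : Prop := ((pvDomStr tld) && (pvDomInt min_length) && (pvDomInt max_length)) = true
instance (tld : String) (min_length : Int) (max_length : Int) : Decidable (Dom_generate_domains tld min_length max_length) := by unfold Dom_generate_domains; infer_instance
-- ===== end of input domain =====

-- B generates only valid domains directly (restricted alphabets at the edges) instead of filtering the full product; same output order.


-- ===== PORT A =====
-- tld.lstrip('.') : drops exactly the leading '.' characters (exact hand port; PySem has no lstrip-with-chars)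
def pvLstripDots (tld : String) : List Char := tld.toList.dropWhile (· == '.')

-- string.ascii_lowercase + string.digits + "-"
def pvCharsA : List Char := "abcdefghijklmnopqrstuvwxyz0123456789-".toList

-- itertools.product(cs, repeat=n), lexicographic (leftmost position varies slowest)
def pvProd (cs : List Char) : Nat → List (List Char)
  | 0 => [[]]
  | n+1 => cs.flatMap (fun c => (pvProd cs n).map (c :: ·))

-- is_valid_domain; on the empty domain Python raises IndexError (pyGet? = none) — those inputs are outside Pre_
def pvIsValidDomain (domain : List Char) : Bool :=
  match PySem.List.pyGet? domain 0, PySem.List.pyGet? domain (-1) with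
  | some c0, some cl =>
    if c0 = '-' || cl = '-' then false
    else if !(domain.any PySem.Chars.isalnum) then false
    else if PySem.Chars.startswith domain ['-', '-'] || PySem.Chars.endswith domain ['-', '-'] then false
    else true
  | _, _ => false

-- the generator, collected into a list; length.toNat is only reached with length ≥ 1 inside Pre_
def generate_domains (tld : String) (min_length : Int) (max_length : Int) : List String :=
  let chars := pvCharsA
  let tld2 := pvLstripDots tld
  (PySem.List.pyRange min_length (max_length + 1) 1).foldl (fun acc length =>
    (pvProd chars length.toNat).foldl (fun acc2 combo =>
      if pvIsValidDomain combo then acc2 ++ [String.mk (combo ++ '.' :: tld2)] else acc2) acc) []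

-- ===== PORT B =====
def pvAlnum : List Char := "abcdefghijklmnopqrstuvwxyz0123456789".toList

-- itertools.product(*pools)
def pvProdPools : List (List Char) → List (List Char)
  | [] => [[]]
  | p :: ps => p.flatMap (fun c => (pvProdPools ps).map (c :: ·))

def generate_domains_alt (tld : String) (min_length : Int) (max_length : Int) : List String :=
  let alnum := pvAlnum
  let chars := alnum ++ ['-']
  let suffix := '.' :: pvLstripDots tld
  (PySem.List.pyRange (max min_length 1) (max_length + 1) 1).foldl (fun acc length =>
    let pools := if length = 1 then [alnum]
                 else [alnum] ++ List.replicate (length.toNat - 2) chars ++ [alnum]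
    (pvProdPools pools).foldl (fun acc2 combo => acc2 ++ [String.mk (combo ++ suffix)]) acc) []

-- ===== PRECONDITION & SPEC =====
-- Pre_ excludes exactly the inputs on which A raises: a non-positive length inside range(min_length, max_length+1)
def Pre_generate_domains (tld : String) (min_length : Int) (max_length : Int) : Prop :=
  1 ≤ min_length ∨ max_length < min_length
instance (tld : String) (min_length : Int) (max_length : Int) : Decidable (Pre_generate_domains tld min_length max_length) := by unfold Pre_generate_domains; infer_instance

def pvWitness_generate_domains : String × Int × Int := (".com", 1, 2)

def Spec_generate_domains (tld : String) (min_length : Int) (max_length : Int) (out : List String) : Prop := out = generate_domains_alt tld min_length max_length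
instance (tld : String) (min_length : Int) (max_length : Int) (out : List String) : Decidable (Spec_generate_domains tld min_length max_length out) := by unfold Spec_generate_domains; infer_instance

-- ===== CLAIM (what is proved, stated in full; the proofs are below) =====
def Claim_equal_generate_domains : Prop := ∀ (tld : String) (min_length : Int) (max_length : Int), Dom_generate_domains tld min_length max_length → Pre_generate_domains tld min_length max_length → Spec_generate_domains tld min_length max_length (generate_domains tld min_length max_length)


-- ===== LEMMAS AND PROOFS =====

-- every character of pvCharsA that is not '-' is alphanumeric
lemma pvCharsA_alnum : ∀ c ∈ pvCharsA, c ≠ '-' → PySem.Chars.isalnum c = true := by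
  have h : pvCharsA.all (fun c => (c == '-') || PySem.Chars.isalnum c) = true := by rfl
  intro c hc hne
  have := List.all_eq_true.mp h c hc
  simpa [hne] using this

-- snoc form of the repeated product
lemma pvProd_snoc (cs : List Char) (m : Nat) :
    pvProd cs (m + 1) = (pvProd cs m).flatMap (fun w => cs.map (fun z => w ++ [z])) := by
  induction m with
  | zero => simp [pvProd, ← List.map_eq_flatMap]
  | succ k ih =>
    show cs.flatMap (fun c => (pvProd cs (k+1)).map (c :: ·)) =
      (cs.flatMap (fun c => (pvProd cs k).map (c :: ·))).flatMap (fun w => cs.map (fun z => w ++ [z]))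
    rw [ih]
    simp [List.map_flatMap, List.flatMap_map, List.flatMap_assoc, List.map_map,
      Function.comp_def, List.cons_append]

lemma pvProdPools_cons (p : List Char) (ps : List (List Char)) :
    pvProdPools (p :: ps) = p.flatMap (fun c => (pvProdPools ps).map (c :: ·)) := rfl

lemma pvProdPools_replicate (cs : List Char) (m : Nat) :
    pvProdPools (List.replicate m cs) = pvProd cs m := by
  induction m with
  | zero => rfl
  | succ k ih => simp [List.replicate_succ, pvProdPools_cons, ih, pvProd]

lemma pvProdPools_append (ps qs : List (List Char)) :
    pvProdPools (ps ++ qs) = (pvProdPools ps).flatMap (fun x => (pvProdPools qs).map (x ++ ·)) := by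
  induction ps with
  | nil => simp [pvProdPools]
  | cons p ps ih =>
    simp [pvProdPools_cons, ih, List.map_flatMap, List.flatMap_map, List.flatMap_assoc,
      Function.comp_def, List.map_map]

-- validity of an explicit first/last decomposition
lemma pvIsValid_edge (c z : Char) (w : List Char) (hc : c ∈ pvCharsA) :
    pvIsValidDomain (c :: (w ++ [z])) = ((c != '-') && (z != '-')) := by
  have hlast : PySem.List.pyGet? (c :: (w ++ [z])) (-1) = some z := by
    simpa using PySem.List.pyGet?_neg_one_append_singleton (c :: w) z
  unfold pvIsValidDomain
  rw [hlast, PySem.List.pyGet?_zero_cons]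
  by_cases hcd : c = '-'
  · simp [hcd]
  · by_cases hzd : z = '-'
    · simp [hzd]
    · have hany : (c :: (w ++ [z])).any PySem.Chars.isalnum = true := by
        simp [List.any_cons, pvCharsA_alnum c hc hcd]
      have hpre : PySem.Chars.startswith (c :: (w ++ [z])) ['-', '-'] = false := by
        rw [Bool.eq_false_iff]
        intro h
        have := (PySem.Chars.startswith_iff _ _).mp h
        rw [List.cons_prefix_cons] at this
        exact hcd this.1.symm
      have hsuf : PySem.Chars.endswith (c :: (w ++ [z])) ['-', '-'] = false := by
        rw [Bool.eq_false_iff]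
        intro h
        obtain ⟨t, ht⟩ := (PySem.Chars.endswith_iff _ _).mp h
        have h1 : (c :: (w ++ [z])).getLast? = some z := by
          rw [show c :: (w ++ [z]) = (c :: w) ++ [z] by simp, List.getLast?_concat]
        have h2 : (c :: (w ++ [z])).getLast? = some '-' := by
          rw [← ht, show t ++ ['-', '-'] = (t ++ ['-']) ++ ['-'] by simp, List.getLast?_concat]
        rw [h1] at h2
        exact hzd (Option.some.injEq .. ▸ h2)
      simp [hcd, hzd, hany, hpre, hsuf]

-- pvCharsA splits as pvAlnum ++ ['-']
lemma pvCharsA_eq : pvCharsA = pvAlnum ++ ['-'] := by decide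

-- length-1 case: filtering the 37 singletons leaves exactly the alphanumeric singletons
lemma filter_prod_one :
    (pvProd pvCharsA 1).filter pvIsValidDomain = pvProdPools [pvAlnum] := by decide

-- length ≥ 2 case: the filtered full product is the product over restricted edge alphabets
lemma filter_prod_two (m : Nat) :
    (pvProd pvCharsA (m + 2)).filter pvIsValidDomain =
      pvProdPools ([pvAlnum] ++ List.replicate m pvCharsA ++ [pvAlnum]) := by
  -- right-hand side: a ∈ alnum, middle word w, z ∈ alnum
  have hrhs : pvProdPools ([pvAlnum] ++ List.replicate m pvCharsA ++ [pvAlnum]) =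
      pvAlnum.flatMap (fun a => (pvProd pvCharsA m).flatMap (fun w =>
        pvAlnum.map (fun z => a :: (w ++ [z])))) := by
    rw [show ([pvAlnum] ++ List.replicate m pvCharsA ++ [pvAlnum]) =
          pvAlnum :: (List.replicate m pvCharsA ++ [pvAlnum]) by simp]
    rw [pvProdPools_cons, pvProdPools_append, pvProdPools_replicate]
    simp [pvProdPools, List.map_flatMap, List.flatMap_map, List.flatMap_assoc,
      Function.comp_def, List.map_map, ← List.map_eq_flatMap]
  -- left-hand side: decompose first and last characters
  have hlhs : pvProd pvCharsA (m + 2) =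
      pvCharsA.flatMap (fun c => (pvProd pvCharsA m).flatMap (fun w =>
        pvCharsA.map (fun z => c :: (w ++ [z])))) := by
    show pvCharsA.flatMap (fun c => (pvProd pvCharsA (m + 1)).map (c :: ·)) = _
    rw [pvProd_snoc]
    simp [List.map_flatMap, List.flatMap_map, List.flatMap_assoc, Function.comp_def,
      List.map_map]
  rw [hlhs, hrhs, pvCharsA_eq, List.flatMap_append]
  have hdropLast : ∀ c ∈ ((['-'] : List Char)), ((pvProd (pvAlnum ++ ['-']) m).flatMap (fun w =>
      ((pvAlnum ++ ['-']).map (fun z => c :: (w ++ [z]))))).filter pvIsValidDomain = [] := by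
    intro c hc
    rw [List.mem_singleton] at hc
    subst hc
    rw [List.filter_flatMap]
    apply List.flatMap_eq_nil_iff.mpr
    intro w _
    rw [List.filter_map]
    have : List.filter (pvIsValidDomain ∘ fun z => '-' :: (w ++ [z])) (pvAlnum ++ ['-']) = [] := by
      apply List.filter_eq_nil_iff.mpr
      intro z _
      simp only [Function.comp_apply]
      rw [pvIsValid_edge '-' z w (by rw [pvCharsA_eq]; decide)]
      simp
    rw [this, List.map_nil]
  rw [List.filter_append, List.filter_flatMap, List.filter_flatMap]
  have h2 : (['-'] : List Char).flatMap (fun c => (((pvProd (pvAlnum ++ ['-']) m).flatMap (fun w =>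
      ((pvAlnum ++ ['-']).map (fun z => c :: (w ++ [z]))))).filter pvIsValidDomain)) = [] := by
    apply List.flatMap_eq_nil_iff.mpr
    exact hdropLast
  rw [h2, List.append_nil]
  apply List.flatMap_congr
  intro a ha
  rw [List.filter_flatMap]
  apply List.flatMap_congr
  intro w _
  rw [List.filter_map]
  congr 1
  have hane : a ≠ '-' := by
    intro h; subst h; revert ha; decide
  have : List.filter (pvIsValidDomain ∘ fun z => a :: (w ++ [z])) (pvAlnum ++ ['-']) = pvAlnum := by
    have hstep : ∀ z ∈ pvAlnum ++ ['-'],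
        (pvIsValidDomain ∘ fun z => a :: (w ++ [z])) z = (z != '-') := by
      intro z _
      simp only [Function.comp_apply]
      rw [pvIsValid_edge a z w (by rw [pvCharsA_eq]; exact List.mem_append_left _ ha)]
      simp [hane]
    rw [List.filter_congr hstep]
    decide
  rw [this]

-- the full per-length identity, for any length n ≥ 1 and any suffix
lemma per_length (n : Nat) (hn : 1 ≤ n) (suffix : List Char) :
    ((pvProd pvCharsA n).filter pvIsValidDomain).map (fun combo => String.mk (combo ++ suffix)) =
      (pvProdPools (if (n : Int) = 1 then [pvAlnum]
        else [pvAlnum] ++ List.replicate (((n : Int)).toNat - 2) (pvAlnum ++ ['-']) ++ [pvAlnum])).map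
        (fun combo => String.mk (combo ++ suffix)) := by
  congr 1
  match n, hn with
  | 1, _ => simpa using filter_prod_one
  | (m + 2), _ =>
    have hne : ((m + 2 : Nat) : Int) ≠ 1 := by push_cast; omega
    have htn : ((m + 2 : Nat) : Int).toNat - 2 = m := by omega
    rw [if_neg hne, htn, ← pvCharsA_eq]
    exact filter_prod_two m

-- ===== VERDICT (by name: the statement is the Claim_ definition above) =====
theorem generate_domains_spec : Claim_equal_generate_domains := by
  intro tld min_length max_length _ hpre
  show generate_domains tld min_length max_length = generate_domains_alt tld min_length max_length
  unfold generate_domains generate_domains_alt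
  simp only [PySem.List.foldl_append_if, PySem.List.foldl_append_singleton_eq_map,
    PySem.List.foldl_append_eq_flatMap, List.nil_append]
  rcases hpre with h1 | h2
  · -- 1 ≤ min_length : ranges coincide, lengths are positive
    rw [max_eq_left h1]
    apply List.flatMap_congr
    intro L hL
    have hge : 1 ≤ L := le_trans h1 ((PySem.List.mem_pyRange_one).mp hL).1
    have hn : 1 ≤ L.toNat := by omega
    have hLn : L = ((L.toNat : Nat) : Int) := by omega
    rw [hLn]
    exact per_length L.toNat hn ('.' :: pvLstripDots tld)
  · -- empty range on both sides
    have hb : max_length + 1 ≤ max min_length 1 := by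
      rcases le_total 1 min_length with h | h
      · exact le_trans (by omega) (le_max_left _ _)
      · exact le_trans (by omega) (le_max_right _ _)
    rw [PySem.List.pyRange_one_eq_nil (by omega : max_length + 1 ≤ min_length),
        PySem.List.pyRange_one_eq_nil hb]
    simp
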